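-- pv_equiv track=rewrite | github.com/adambehrendt/Crowdsourced-Courier-Scheduling | utils.py | convert_to_single_minute_bins
-- ===== SOURCE A (Python) =====
-- def convert_to_single_minute_bins(original, min_per_bin, T):
-- 	output = [0 for _ in range(T)]
-- 	current_mult = 1
-- 	orig_index = 0
-- 	for i in range(T):
-- 		if i == 0:
-- 			continue
-- 		else:
-- 			if i < min_per_bin*current_mult:
-- 				output[i] = original[orig_index]
-- 			else:
-- 				orig_index += 1
-- 				current_mult += 1
-- 				output[i] = original[orig_index]
--
-- 	return output
-- ===== SOURCE B (Python) =====
-- def convert_to_single_minute_bins(original, min_per_bin, T):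
-- 	if T <= 0:
-- 		return []
-- 	expanded = []
-- 	for v in original:
-- 		need = T - len(expanded)
-- 		if need <= 0:
-- 			break
-- 		expanded += [v] * min(min_per_bin, need)
-- 	return [0] + expanded[1:T]
-- ===== Notes on version B (the rewrite author's own statement) =====
-- stated objective: alternative
-- what changed: B iterates over bins, not minutes: it builds the expanded per-minute sequence by list repetition ([v]*min(min_per_bin, need)) with an early break once T minutes are covered, then returns [0]+expanded[1:T]; A's per-minute loop and its orig_index/current_mult accumulators disappear.
-- outside the precondition, e.g. on convert_to_single_minute_bins([5, 6, 7], 0, 3): A returns [0, 6, 7], B returns [0]; on convert_to_single_minute_bins([5, 6, 7], -1, 3): A returns [0, 6, 7], B returns [0]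
import Mathlib
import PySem

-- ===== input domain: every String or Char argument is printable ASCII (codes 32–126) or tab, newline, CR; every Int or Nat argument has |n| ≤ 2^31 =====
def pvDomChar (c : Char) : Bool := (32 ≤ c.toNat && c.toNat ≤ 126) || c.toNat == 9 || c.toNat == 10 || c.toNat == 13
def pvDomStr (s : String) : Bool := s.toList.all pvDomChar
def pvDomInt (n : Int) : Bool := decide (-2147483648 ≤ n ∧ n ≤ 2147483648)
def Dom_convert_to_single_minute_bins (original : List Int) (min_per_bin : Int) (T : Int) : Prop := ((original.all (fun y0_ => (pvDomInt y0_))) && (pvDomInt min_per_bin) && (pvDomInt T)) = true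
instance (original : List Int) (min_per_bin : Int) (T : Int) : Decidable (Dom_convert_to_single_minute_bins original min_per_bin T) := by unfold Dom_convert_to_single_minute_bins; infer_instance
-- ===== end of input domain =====

-- B expands bin values by capped repetition ([v]*min(min_per_bin, need)) with an early break, then slices [0]+expanded[1:T] (alternative decomposition, same result).


-- ===== PORT A =====
-- step of A's for-loop; state = (output, current_mult, orig_index)
def pvStepA (original : List Int) (min_per_bin : Int)
    (st : List Int × Int × Int) (i : Int) : List Int × Int × Int :=
  if i == 0 then st
  else if i < min_per_bin * st.2.1 then
    (PySem.List.pySetD st.1 i (PySem.List.pyGetD original st.2.2 0), st.2.1, st.2.2)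
  else
    (PySem.List.pySetD st.1 i (PySem.List.pyGetD original (st.2.2 + 1) 0),
     st.2.1 + 1, st.2.2 + 1)

def convert_to_single_minute_bins (original : List Int) (min_per_bin : Int) (T : Int) : List Int :=
  let output : List Int := (PySem.List.pyRange 0 T 1).map (fun _ => 0)
  ((PySem.List.pyRange 0 T 1).foldl (pvStepA original min_per_bin) (output, 1, 0)).1

-- ===== PORT B =====
-- B's bin loop: 'expanded += [v] * min(min_per_bin, need)' with early break once need ≤ 0
def pvExpandB (min_per_bin T : Int) : List Int → List Int → List Int
  | [], acc => acc
  | v :: rest, acc =>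
      let need : Int := T - acc.length
      if need ≤ 0 then acc
      else pvExpandB min_per_bin T rest (acc ++ PySem.List.pyRepeat [v] (min min_per_bin need))

def convert_to_single_minute_bins_alt (original : List Int) (min_per_bin : Int) (T : Int) : List Int :=
  if T ≤ 0 then []
  else
    let expanded : List Int := pvExpandB min_per_bin T original []
    [0] ++ PySem.List.slice expanded (some 1) (some T)

-- ===== PRECONDITION & SPEC =====
-- Pre_ admits any trivial call (T ≤ 1: no bin is read) and otherwise keeps min_per_bin ≥ 1 (the
-- natural domain: a bin spans at least one minute; for min_per_bin ≤ 0 with T ≥ 2 A still returns —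
-- an accidental per-minute copy — while B's expanded list is empty) and excludes the inputs on which
-- A raises IndexError because original has too few bins for T minutes.
def Pre_convert_to_single_minute_bins (original : List Int) (min_per_bin : Int) (T : Int) : Prop :=
  T ≤ 1 ∨ (1 ≤ min_per_bin ∧ PySem.Int.floordiv (T - 1) min_per_bin < original.length)
instance (original : List Int) (min_per_bin : Int) (T : Int) : Decidable (Pre_convert_to_single_minute_bins original min_per_bin T) := by unfold Pre_convert_to_single_minute_bins; infer_instance

def pvWitness_convert_to_single_minute_bins : List Int × Int × Int := ([5, 6, 7], 2, 6)

def Spec_convert_to_single_minute_bins (original : List Int) (min_per_bin : Int) (T : Int) (out : List Int) : Prop := out = convert_to_single_minute_bins_alt original min_per_bin T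
instance (original : List Int) (min_per_bin : Int) (T : Int) (out : List Int) : Decidable (Spec_convert_to_single_minute_bins original min_per_bin T out) := by unfold Spec_convert_to_single_minute_bins; infer_instance

-- ===== CLAIM (what is proved, stated in full; the proofs are below) =====
def Claim_equal_convert_to_single_minute_bins : Prop := ∀ (original : List Int) (min_per_bin : Int) (T : Int), Dom_convert_to_single_minute_bins original min_per_bin T → Pre_convert_to_single_minute_bins original min_per_bin T → Spec_convert_to_single_minute_bins original min_per_bin T (convert_to_single_minute_bins original min_per_bin T)

-- ===== LEMMAS AND PROOFS =====

lemma pv_floordiv_zero (m : Int) (hm : 1 ≤ m) : PySem.Int.floordiv 0 m = 0 := by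
  rw [PySem.Int.floordiv_eq_ediv_of_pos (by omega)]; simp

-- invariant for A's loop: after processing 0..n-1 (n ≥ 1), output is the per-minute set loop over
-- 1..n-1 with value original[i // m] and the accumulators equal floor((n-1)/m) (+1).
lemma pv_loop_inv (original : List Int) (m : Int) (hm : 1 ≤ m) (out0 : List Int)
    (n : Nat) (hn : 1 ≤ n) :
    (PySem.List.pyRange 0 (n : Int) 1).foldl (pvStepA original m) (out0, 1, 0) =
      ((PySem.List.pyRange 1 (n : Int) 1).foldl
         (fun out i =>
           PySem.List.pySetD out i (PySem.List.pyGetD original (PySem.Int.floordiv i m) 0))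
         out0,
       PySem.Int.floordiv ((n : Int) - 1) m + 1,
       PySem.Int.floordiv ((n : Int) - 1) m) := by
  induction n, hn using Nat.le_induction with
  | base =>
      have h1 : PySem.List.pyRange 0 (1 : Int) 1 = [0] := PySem.List.pyRange_one_singleton 0
      have h2 : PySem.List.pyRange 1 (1 : Int) 1 = [] := PySem.List.pyRange_one_eq_nil (by omega)
      simp [h1, h2, pvStepA, pv_floordiv_zero m hm]
  | succ n hn ih =>
      have hc : ((n + 1 : Nat) : Int) = (n : Int) + 1 := by push_cast; ring
      rw [hc, PySem.List.pyRange_one_succ_right (by omega : (0:Int) ≤ (n:Int)),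
          PySem.List.pyRange_one_succ_right (by omega : (1:Int) ≤ (n:Int)),
          List.foldl_append, List.foldl_append, ih]
      set q := PySem.Int.floordiv ((n : Int) - 1) m with hq
      have hqb : q * m ≤ (n : Int) - 1 ∧ (n : Int) - 1 < (q + 1) * m :=
        (PySem.Int.floordiv_eq_iff_of_pos (by omega)).mp hq.symm
      simp only [List.foldl_cons, List.foldl_nil, pvStepA]
      have hne : ((n : Int) == 0) = false := by simp; omega
      rw [hne]
      simp only [Bool.false_eq_true, if_false]
      have hsimp : (n : Int) + 1 - 1 = (n : Int) := by ring
      rw [hsimp]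
      by_cases hlt : (n : Int) < m * (q + 1)
      · have hdiv : PySem.Int.floordiv (n : Int) m = q := by
          rw [PySem.Int.floordiv_eq_iff_of_pos (by omega)]
          constructor
          · linarith [hqb.1]
          · linarith [mul_comm m (q + 1), hlt]
        simp [hlt, hdiv]
      · have hdiv : PySem.Int.floordiv (n : Int) m = q + 1 := by
          rw [PySem.Int.floordiv_eq_iff_of_pos (by omega)]
          constructor
          · have := mul_comm m (q + 1); push_neg at hlt; linarith
          · have : (q + 2) * m = (q + 1) * m + m := by ring
            linarith [hqb.2]
        simp [hlt, hdiv]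

-- indexing the bin-expanded list: element i of flatMap (replicate k) is element i / k of the source.
lemma pv_flatMap_replicate_get (l : List Int) (k : Nat) (hk : 0 < k) (i : Nat) :
    (l.flatMap (fun v => List.replicate k v))[i]? = l[i / k]? := by
  induction l generalizing i with
  | nil => simp
  | cons a t ih =>
      simp only [List.flatMap_cons]
      by_cases h : i < k
      · rw [List.getElem?_append_left (by simpa using h), Nat.div_eq_of_lt h]
        simp [h]
      · push_neg at h
        obtain ⟨j, rfl⟩ := Nat.exists_eq_add_of_le h
        rw [List.getElem?_append_right (by simpa using h)]
        simp only [List.length_replicate]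
        rw [show k + j - k = j by omega, ih]
        have : (k + j) / k = j / k + 1 := by
          rw [Nat.add_comm, Nat.add_div_right _ hk]
        rw [this]
        simp

-- B's capped bin loop is the truncated full expansion
lemma pvExpandB_full (m T : Int) (l acc : List Int) (h : T ≤ (acc.length : Int)) :
    pvExpandB m T l acc = acc := by
  cases l with
  | nil => rfl
  | cons v rest =>
      unfold pvExpandB
      rw [if_pos (by omega)]

lemma pvExpandB_eq_take (m T : Int) (hm : 1 ≤ m) (l : List Int) (acc : List Int)
    (h : (acc.length : Int) ≤ T) :
    pvExpandB m T l acc = (acc ++ l.flatMap (List.replicate m.toNat)).take T.toNat := by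
  induction l generalizing acc with
  | nil =>
      unfold pvExpandB
      rw [List.flatMap_nil, List.append_nil, List.take_of_length_le (by omega)]
  | cons v rest ih =>
      unfold pvExpandB
      by_cases h0 : T - (acc.length : Int) ≤ 0
      · rw [if_pos h0]
        rw [List.take_append_of_le_length (by omega), List.take_of_length_le (by omega)]
      · rw [if_neg h0]
        simp only [PySem.List.pyRepeat_singleton]
        by_cases hcase : m ≤ T - (acc.length : Int)
        · rw [show min m (T - (acc.length : Int)) = m by omega]
          rw [ih (acc ++ List.replicate m.toNat v) (by
                rw [List.length_append, List.length_replicate]; push_cast; omega)]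
          rw [List.flatMap_cons, List.append_assoc]
        · rw [show min m (T - (acc.length : Int)) = T - (acc.length : Int) by omega]
          rw [pvExpandB_full m T rest _ (by
                rw [List.length_append, List.length_replicate]; push_cast; omega)]
          rw [List.flatMap_cons,
              List.take_append,
              List.take_of_length_le (by omega),
              List.take_append_of_le_length (by rw [List.length_replicate]; omega),
              List.take_replicate]
          congr 2
          omega

-- the fold of index-wise sets preserves length
lemma pv_set_loop_len (f : Int → Int) (l : List Int) (out0 : List Int) :
    (l.foldl (fun out i => PySem.List.pySetD out i (f i)) out0).length = out0.length := by
  induction l generalizing out0 with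
  | nil => rfl
  | cons a t ih => simp only [List.foldl_cons]; rw [ih, PySem.List.length_pySetD]

-- pointwise value of A's per-minute set loop over 1..n-1
lemma pv_set_loop_get (f : Int → Int) (n : Nat) (out0 : List Int) (hn : n ≤ out0.length)
    (j : Nat) :
    ((PySem.List.pyRange 1 (n : Int) 1).foldl
        (fun out i => PySem.List.pySetD out i (f i)) out0)[j]? =
      if 1 ≤ j ∧ j < n then some (f (j : Int)) else out0[j]? := by
  induction n with
  | zero =>
      rw [PySem.List.pyRange_one_eq_nil (by omega)]
      rw [if_neg (by omega)]
      rfl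
  | succ n ih =>
      by_cases hn0 : n = 0
      · subst hn0
        rw [show ((1 : Nat) : Int) = 1 by norm_num, PySem.List.pyRange_one_eq_nil (by omega)]
        rw [if_neg (by omega)]
        rfl
      · have hc : ((n + 1 : Nat) : Int) = (n : Int) + 1 := by push_cast; ring
        rw [hc, PySem.List.pyRange_one_succ_right (by omega : (1:Int) ≤ (n:Int)),
            List.foldl_append]
        simp only [List.foldl_cons, List.foldl_nil]
        rw [PySem.List.pySetD_natCast, List.getElem?_set, pv_set_loop_len, ih (by omega)]
        by_cases hj : n = j
        · subst hj
          rw [if_pos rfl, if_pos (by omega), if_pos ⟨by omega, by omega⟩]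
        · rw [if_neg hj]
          split_ifs <;> first | rfl | omega

theorem convert_to_single_minute_bins_spec : Claim_equal_convert_to_single_minute_bins := by
  intro original m T _ hpre
  unfold Spec_convert_to_single_minute_bins convert_to_single_minute_bins convert_to_single_minute_bins_alt
  dsimp only
  by_cases hT : T ≤ 0
  · have h1 : PySem.List.pyRange 0 T 1 = [] := PySem.List.pyRange_one_eq_nil (by omega)
    rw [h1]
    simp [hT]
  · rw [if_neg hT]
    by_cases hT1 : T = 1
    · subst hT1
      have h1 : PySem.List.pyRange 0 (1 : Int) 1 = [0] := PySem.List.pyRange_one_singleton 0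
      rw [h1]
      simp [pvStepA, PySem.List.slice_toNat _ (by omega : (0:Int) ≤ 1) (by omega : (0:Int) ≤ 1)]
    · -- T ≥ 2: use Pre_'s second disjunct
      have hm : 1 ≤ m := (hpre.resolve_left (by omega)).1
      have hflo : PySem.Int.floordiv (T - 1) m < original.length :=
        (hpre.resolve_left (by omega)).2
      have hmt : 0 < m.toNat := by omega
      -- B's capped expansion as a take of the full flatMap of replicates
      have hexp : pvExpandB m T original [] =
          (original.flatMap (fun v => List.replicate m.toNat v)).take T.toNat := by
        have := pvExpandB_eq_take m T hm original [] (by simp; omega)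
        simpa using this
      set expanded := original.flatMap (fun v => List.replicate m.toNat v) with hexpdef
      have hlenexp : expanded.length = original.length * m.toNat := by
        simp only [hexpdef, List.length_flatMap]
        rw [show (fun v : Int => (List.replicate m.toNat v).length) = fun _ => m.toNat by
              funext v; exact List.length_replicate]
        rw [List.map_const', List.sum_replicate, smul_eq_mul]
      -- floordiv on nonneg = Nat division
      have hfd : ∀ j : Nat, PySem.Int.floordiv (j : Int) m = ((j / m.toNat : Nat) : Int) := by
        intro j
        rw [PySem.Int.floordiv_eq_ediv_of_pos (by omega)]
        rw [show m = (m.toNat : Int) by omega]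
        exact (Int.ofNat_ediv_ofNat).symm
      -- length bound: T.toNat ≤ expanded.length
      have hTlen : T.toNat ≤ expanded.length := by
        have h2 : PySem.Int.floordiv (T - 1) m = (((T.toNat - 1) / m.toNat : Nat) : Int) := by
          rw [show T - 1 = ((T.toNat - 1 : Nat) : Int) by omega]
          exact hfd (T.toNat - 1)
        rw [h2] at hflo
        have h3 : (T.toNat - 1) / m.toNat < original.length := by exact_mod_cast hflo
        have := (Nat.div_lt_iff_lt_mul hmt).mp h3
        rw [hlenexp]
        omega
      -- A side: invariant over the accumulators
      have hn1 : 1 ≤ T.toNat := by omega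
      have hcast : ((T.toNat : Nat) : Int) = T := Int.toNat_of_nonneg (by omega)
      have hout0 : (PySem.List.pyRange 0 T 1).map (fun _ => (0 : Int)) = List.replicate T.toNat 0 := by
        rw [List.map_const', PySem.List.length_pyRange_one]
        norm_num
      have hinv := pv_loop_inv original m hm (List.replicate T.toNat 0) T.toNat hn1
      rw [hcast] at hinv
      rw [hout0, hinv]
      -- B side: slice as drop/take
      rw [hexp, PySem.List.slice_toNat _ (by omega : (0:Int) ≤ 1) (by omega : (0:Int) ≤ T)]
      simp only [Int.toNat_one]
      -- pointwise comparison
      apply List.ext_getElem?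
      intro j
      have hget := pv_set_loop_get
        (fun i => PySem.List.pyGetD original (PySem.Int.floordiv i m) 0)
        T.toNat (List.replicate T.toNat 0) (by rw [List.length_replicate]) j
      rw [hcast] at hget
      rw [hget]
      have hMake : ([(0 : Int)] ++ ((expanded.take T.toNat).drop 1).take (T.toNat - 1)) = (0 : Int) :: ((expanded.take T.toNat).drop 1).take (T.toNat - 1) := rfl
      rw [hMake]
      match j with
      | 0 =>
          rw [if_neg (by omega)]
          rw [List.getElem?_replicate, if_pos (by omega)]
          rfl
      | Nat.succ k =>
          rw [List.getElem?_cons_succ, List.getElem?_take]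
          by_cases hk : k + 1 < T.toNat
          · rw [if_pos ⟨by omega, hk⟩, if_pos (by omega)]
            rw [List.getElem?_drop, List.getElem?_take, if_pos (by omega)]
            have hjlt : (1 + k) / m.toNat < original.length := by
              rw [Nat.div_lt_iff_lt_mul hmt]
              rw [hlenexp] at hTlen
              omega
            have hfm := pv_flatMap_replicate_get original m.toNat hmt (1 + k)
            rw [← hexpdef] at hfm
            rw [hfm, List.getElem?_eq_getElem hjlt]
            rw [show ((k.succ : Nat) : Int) = ((1 + k : Nat) : Int) by push_cast; ring,
                hfd (1 + k)]
            rw [PySem.List.pyGetD_natCast, List.getD_eq_getElem _ _ hjlt]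
          · rw [if_neg (by omega), if_neg (by omega)]
            rw [List.getElem?_replicate, if_neg (by omega)]
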